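-- pv_equiv track=rewrite | github.com/Majeed7/GEMFIX | subset_max.py | get_highest_sum_comb
-- ===== SOURCE A (Python) =====
-- def get_lowest_abs_sum_comb(queue):
--     """
--     Returns all possible sums generated from the given queue (in Python, a list).
--     """
--     sum_comb = [0]
--     for value in queue:
--         sum_comb.extend([x + value for x in sum_comb])
--     return sum_comb
--
-- def get_highest_sum_comb(queue, total, z):
--     """
--     Calculates the Z highest sums given the base total and a queue of lowest positive sums.
--     """
--     lowest_sums = get_lowest_abs_sum_comb(queue)
--     lowest_sums.sort()
--
--     if z == len(lowest_sums):
--         result = lowest_sums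
--     else:
--         result = lowest_sums[:z]
--
--     return [total - x for x in result]
-- ===== SOURCE B (Python) =====
-- def get_highest_sum_comb(queue, total, z):
--     """
--     Calculates the Z highest sums given the base total and a queue of lowest positive sums.
--     Builds the subset sums already sorted by pairwise merging, so no final sort is needed.
--     """
--     sums = [0]
--     for value in queue:
--         shifted = [x + value for x in sums]
--         # merge two sorted lists (two-pointer)
--         merged = []
--         i = j = 0
--         while i < len(sums) and j < len(shifted):
--             if sums[i] <= shifted[j]:
--                 merged.append(sums[i])
--                 i += 1
--             else:
--                 merged.append(shifted[j])
--                 j += 1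
--         merged.extend(sums[i:])
--         merged.extend(shifted[j:])
--         sums = merged
--     return [total - x for x in sums[:z]]
-- ===== Notes on version B (the rewrite author's own statement) =====
-- stated objective: alternative
-- what changed: Instead of generating all 2^n subset sums in arbitrary order and sorting at the end, B keeps the subset-sum list sorted throughout by merging each sorted list with its shifted copy (two-pointer merge), eliminating the final sort; the z==len special case disappears since sums[:z] already equals the whole list then (fewer comparisons asymptotically, but no measured speed gain: Python's C sort beats a pure-Python merge).
import Mathlib
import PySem

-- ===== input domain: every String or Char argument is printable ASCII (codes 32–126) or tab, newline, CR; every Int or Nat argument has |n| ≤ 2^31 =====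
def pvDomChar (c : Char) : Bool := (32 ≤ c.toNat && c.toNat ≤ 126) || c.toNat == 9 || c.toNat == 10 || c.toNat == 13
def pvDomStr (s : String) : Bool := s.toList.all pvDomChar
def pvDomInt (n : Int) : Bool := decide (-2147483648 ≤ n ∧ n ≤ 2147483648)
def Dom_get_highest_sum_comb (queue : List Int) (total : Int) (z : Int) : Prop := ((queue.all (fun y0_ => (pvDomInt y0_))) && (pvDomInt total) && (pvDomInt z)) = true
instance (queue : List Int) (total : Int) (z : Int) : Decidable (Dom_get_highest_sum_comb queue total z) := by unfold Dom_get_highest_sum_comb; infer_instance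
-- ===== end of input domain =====

-- B keeps the subset-sum list sorted by pairwise merging, eliminating A's final sort (alternative algorithm, same measured cost).

-- ===== PORT A =====
def get_lowest_abs_sum_comb (queue : List Int) : List Int :=
  queue.foldl (fun sum_comb value => sum_comb ++ sum_comb.map (fun x => x + value)) [0]

-- lowest_sums.sort() ported as the library stable sort List.mergeSort (exact: sorting Ints ascending)
def get_highest_sum_comb (queue : List Int) (total : Int) (z : Int) : List Int :=
  let lowest_sums := (get_lowest_abs_sum_comb queue).mergeSort (fun a b => decide (a ≤ b))
  let result := if z = (lowest_sums.length : Int) then lowest_sums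
                else PySem.List.slice lowest_sums none (some z)
  result.map (fun x => total - x)

-- ===== PORT B =====
-- Source B's two-pointer merge loop: 'merged' is accumulated (kept reversed), the leftover
-- tails are appended at the end, exactly as the Python extends 'merged' with sums[i:] / shifted[j:]
def pvMergeLoop : List Int → List Int → List Int → List Int
  | merged, [], b => merged.reverse ++ b
  | merged, a, [] => merged.reverse ++ a
  | merged, x :: xs, y :: ys =>
      if x ≤ y then pvMergeLoop (x :: merged) xs (y :: ys)
      else pvMergeLoop (y :: merged) (x :: xs) ys

def pvMerge (a b : List Int) : List Int := pvMergeLoop [] a b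

def get_highest_sum_comb_alt (queue : List Int) (total : Int) (z : Int) : List Int :=
  let sums := queue.foldl (fun sums value => pvMerge sums (sums.map (fun x => x + value))) [0]
  (PySem.List.slice sums none (some z)).map (fun x => total - x)

-- ===== PRECONDITION & SPEC =====
-- A is total on the domain, so no Pre_ is defined.
def Spec_get_highest_sum_comb (queue : List Int) (total : Int) (z : Int) (out : List Int) : Prop := out = get_highest_sum_comb_alt queue total z
instance (queue : List Int) (total : Int) (z : Int) (out : List Int) : Decidable (Spec_get_highest_sum_comb queue total z out) := by unfold Spec_get_highest_sum_comb; infer_instance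

-- ===== CLAIM (what is proved, stated in full; the proofs are below) =====
def Claim_equal_get_highest_sum_comb : Prop := ∀ (queue : List Int) (total : Int) (z : Int), Dom_get_highest_sum_comb queue total z → Spec_get_highest_sum_comb queue total z (get_highest_sum_comb queue total z)

-- ===== LEMMAS AND PROOFS =====

-- proof-only view of the merge loop: the plain structural merge
def pvMergeSimple : List Int → List Int → List Int
  | [], b => b
  | a, [] => a
  | x :: xs, y :: ys =>
      if x ≤ y then x :: pvMergeSimple xs (y :: ys) else y :: pvMergeSimple (x :: xs) ys

theorem pvMergeLoop_eq : ∀ (a b merged : List Int),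
    pvMergeLoop merged a b = merged.reverse ++ pvMergeSimple a b := by
  intro a
  induction a with
  | nil => intro b merged; cases b <;> simp [pvMergeLoop, pvMergeSimple]
  | cons x xs ih =>
    intro b
    induction b with
    | nil => intro merged; simp [pvMergeLoop, pvMergeSimple]
    | cons y ys ihb =>
      intro merged
      simp only [pvMergeLoop, pvMergeSimple]
      split_ifs with h
      · rw [ih (y :: ys) (x :: merged)]; simp
      · rw [ihb (y :: merged)]; simp

theorem pvMerge_eq_simple (a b : List Int) : pvMerge a b = pvMergeSimple a b := by
  simp [pvMerge, pvMergeLoop_eq]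

theorem pvMerge_perm : ∀ (a b : List Int), (pvMerge a b).Perm (a ++ b) := by
  intro a b
  rw [pvMerge_eq_simple]
  induction a generalizing b with
  | nil => simp [pvMergeSimple]
  | cons x xs ih =>
    induction b with
    | nil => simp [pvMergeSimple]
    | cons y ys ihb =>
      simp only [pvMergeSimple]
      split_ifs with h
      · exact (ih (y :: ys)).cons x
      · refine (ihb.cons y).trans ?_
        simpa using List.Perm.symm (List.perm_middle (a := y) (l₁ := x :: xs) (l₂ := ys))

theorem pvMergeSimple_sorted : ∀ (a b : List Int), a.Pairwise (· ≤ ·) → b.Pairwise (· ≤ ·) →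
    (pvMergeSimple a b).Pairwise (· ≤ ·) := by
  intro a b
  induction a generalizing b with
  | nil => intro _ hb; simpa [pvMergeSimple]
  | cons x xs ih =>
    induction b with
    | nil => intro ha _; simpa [pvMergeSimple] using ha
    | cons y ys ihb =>
      intro ha hb
      simp only [pvMergeSimple]
      split_ifs with h
      · refine List.pairwise_cons.2 ⟨?_, ih (y :: ys) (List.pairwise_cons.1 ha).2 hb⟩
        intro z hz
        have := ((pvMerge_eq_simple xs (y :: ys) ▸ pvMerge_perm xs (y :: ys))).mem_iff.1 hz
        rcases List.mem_append.1 this with h1 | h1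
        · exact (List.pairwise_cons.1 ha).1 z h1
        · rcases List.mem_cons.1 h1 with rfl | h2
          · exact h
          · exact le_trans h ((List.pairwise_cons.1 hb).1 z h2)
      · refine List.pairwise_cons.2 ⟨?_, ihb ha (List.pairwise_cons.1 hb).2⟩
        intro w hw
        have := ((pvMerge_eq_simple (x :: xs) ys ▸ pvMerge_perm (x :: xs) ys)).mem_iff.1 hw
        have hyx : y ≤ x := le_of_not_ge h
        rcases List.mem_append.1 this with h1 | h1
        · rcases List.mem_cons.1 h1 with rfl | h2
          · exact hyx
          · exact le_trans hyx ((List.pairwise_cons.1 ha).1 w h2)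
        · exact (List.pairwise_cons.1 hb).1 w h1

-- loop invariant: B's accumulator is a sorted permutation of A's accumulator
theorem pvFold_sorted_perm : ∀ (queue : List Int) (acc : List Int), acc.Pairwise (· ≤ ·) →
    (queue.foldl (fun sums value => pvMerge sums (sums.map (fun x => x + value))) acc).Pairwise (· ≤ ·) ∧
    (queue.foldl (fun sums value => pvMerge sums (sums.map (fun x => x + value))) acc).Perm
      (queue.foldl (fun sum_comb value => sum_comb ++ sum_comb.map (fun x => x + value)) acc) := by
  intro queue
  induction queue with
  | nil => intro acc h; exact ⟨h, List.Perm.refl acc⟩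
  | cons v vs ih =>
    intro acc h
    simp only [List.foldl_cons]
    have hmap : (acc.map (fun x => x + v)).Pairwise (· ≤ ·) := by
      exact List.pairwise_map.2 (h.imp (by intro a b hab; omega))
    have hs : (pvMerge acc (acc.map (fun x => x + v))).Pairwise (· ≤ ·) := by
      rw [pvMerge_eq_simple]
      exact pvMergeSimple_sorted acc (acc.map (fun x => x + v)) h hmap
    obtain ⟨hp1, hp2⟩ := ih (pvMerge acc (acc.map (fun x => x + v))) hs
    refine ⟨hp1, hp2.trans ?_⟩
    -- fold A over a permuted accumulator is a permutation of fold A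
    clear hp1 hp2 hs ih
    have key : ∀ (vs : List Int) (a b : List Int), a.Perm b →
        (vs.foldl (fun sum_comb value => sum_comb ++ sum_comb.map (fun x => x + value)) a).Perm
        (vs.foldl (fun sum_comb value => sum_comb ++ sum_comb.map (fun x => x + value)) b) := by
      intro vs
      induction vs with
      | nil => intro a b hab; simpa
      | cons w ws ihw =>
        intro a b hab
        simp only [List.foldl_cons]
        exact ihw _ _ (hab.append (hab.map _))
    exact key vs _ _ (pvMerge_perm acc (acc.map (fun x => x + v)))

theorem pvSums_eq_sorted (queue : List Int) :
    (get_lowest_abs_sum_comb queue).mergeSort (fun a b => decide (a ≤ b)) =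
    queue.foldl (fun sums value => pvMerge sums (sums.map (fun x => x + value))) [0] := by
  obtain ⟨hs, hp⟩ := pvFold_sorted_perm queue [0] (by simp)
  have hperm : ((get_lowest_abs_sum_comb queue).mergeSort (fun a b => decide (a ≤ b))).Perm
      (queue.foldl (fun sums value => pvMerge sums (sums.map (fun x => x + value))) [0]) :=
    (List.mergeSort_perm _ _).trans hp.symm
  have hsortA : ((get_lowest_abs_sum_comb queue).mergeSort (fun a b => decide (a ≤ b))).Pairwise
      (fun a b : Int => a ≤ b) := by
    have := List.pairwise_mergeSort (le := fun a b : Int => decide (a ≤ b))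
      (fun a b c hab hbc => by simp at hab hbc ⊢; omega) (fun a b => by simp; omega)
      (get_lowest_abs_sum_comb queue)
    exact List.Pairwise.imp (by simp) this
  exact List.Perm.eq_of_pairwise' (r := fun a b : Int => a ≤ b) hsortA hs hperm

-- ===== VERDICT (by name: the statement is the Claim_ definition above) =====
theorem get_highest_sum_comb_spec : Claim_equal_get_highest_sum_comb := by
  intro queue total z hdom
  clear hdom
  unfold Spec_get_highest_sum_comb get_highest_sum_comb get_highest_sum_comb_alt
  rw [← pvSums_eq_sorted]
  set L := (get_lowest_abs_sum_comb queue).mergeSort (fun a b => decide (a ≤ b)) with hL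
  by_cases hz : z = (L.length : Int)
  · subst hz
    simp [PySem.List.slice_to_natCast]
  · simp [hz]
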